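-- pv_equiv track=rewrite | github.com/phucle297/tools | review/main.py | parse_diff_for_files
-- ===== SOURCE A (Python) =====
-- from typing import NamedTuple, Optional
--
-- class FileReview(NamedTuple):
--     """Information about a file review"""
--     path: str
--     status: str
--     additions: int
--     deletions: int
--     changes: int
--
-- def parse_diff_for_files(diff: str) -> list[FileReview]:
--     """Parse diff to extract file information"""
--     files = []
--     current_file = ""
--     additions = 0
--     deletions = 0
--
--     for line in diff.split("\n"):
--         if line.startswith("+++ b/"):
--             if current_file:
--                 status = "modified" if additions > 0 or deletions > 0 else "changed"
--                 files.append(FileReview(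
--                     path=current_file,
--                     status=status,
--                     additions=additions,
--                     deletions=deletions,
--                     changes=additions + deletions
--                 ))
--             current_file = line[6:]
--             additions = 0
--             deletions = 0
--         elif line.startswith("+") and not line.startswith("+++"):
--             additions += 1
--         elif line.startswith("-") and not line.startswith("---"):
--             deletions += 1
--
--     if current_file:
--         status = "modified" if additions > 0 or deletions > 0 else "changed"
--         files.append(FileReview(
--             path=current_file,
--             status=status,
--             additions=additions,
--             deletions=deletions,
--             changes=additions + deletions
--         ))
--
--     return files
-- ===== SOURCE B (Python) =====
-- from typing import NamedTuple
--
-- class FileReview(NamedTuple):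
--     path: str
--     status: str
--     additions: int
--     deletions: int
--     changes: int
--
-- def _segments(lines):
--     """lines starts with a '+++ b/' header (or is empty); split into (path, body) blocks."""
--     if not lines:
--         return []
--     path = lines[0][6:]
--     rest = lines[1:]
--     body = []
--     while rest and not rest[0].startswith("+++ b/"):
--         body.append(rest.pop(0))
--     return [(path, body)] + _segments(rest)
--
-- def _review(path, body):
--     adds = sum(1 for l in body if l.startswith("+") and not l.startswith("+++"))
--     dels = sum(1 for l in body if l.startswith("-") and not l.startswith("---"))
--     status = "modified" if adds + dels > 0 else "changed"
--     return FileReview(path, status, adds, dels, adds + dels)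
--
-- def parse_diff_for_files(diff):
--     lines = diff.split("\n")
--     while lines and not lines[0].startswith("+++ b/"):
--         lines.pop(0)
--     return [_review(path, body) for path, body in _segments(lines) if path]
-- ===== Notes on version B (the rewrite author's own statement) =====
-- stated objective: simpler
-- what changed: Replaces A's one-pass accumulator with its duplicated end-of-loop flush by a segment-then-reduce structure: drop the preamble lines, recursively split the remaining lines into (path, body) blocks at diff header lines, then turn each block with a non-empty path into a FileReview by counting its addition and deletion lines.
import Mathlib
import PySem

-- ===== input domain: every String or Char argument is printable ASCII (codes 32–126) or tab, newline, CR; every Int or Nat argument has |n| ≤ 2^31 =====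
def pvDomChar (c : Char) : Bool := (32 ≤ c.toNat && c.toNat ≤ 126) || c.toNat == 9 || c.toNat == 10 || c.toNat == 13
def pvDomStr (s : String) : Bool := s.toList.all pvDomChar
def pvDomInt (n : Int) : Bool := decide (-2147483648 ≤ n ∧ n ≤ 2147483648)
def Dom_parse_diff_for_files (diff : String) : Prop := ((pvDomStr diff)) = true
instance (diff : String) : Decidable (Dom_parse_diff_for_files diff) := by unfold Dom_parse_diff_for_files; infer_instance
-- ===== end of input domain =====

-- B replaces A's flush-on-boundary accumulator by segment-then-reduce (simpler decomposition, same cost).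

-- shared line predicates (the three startswith tests both programs make)
def pvHdr (l : String) : Bool := PySem.Str.startswith l "+++ b/"
def pvPlus (l : String) : Bool := PySem.Str.startswith l "+" && !(PySem.Str.startswith l "+++")
def pvMinus (l : String) : Bool := PySem.Str.startswith l "-" && !(PySem.Str.startswith l "---")

-- ===== PORT A =====
-- one pass; state = (files, current_file, additions, deletions); flush on each header and at the end
def pvStepA (st : List (String × String × Int × Int × Int) × String × Int × Int) (line : String) :
    List (String × String × Int × Int × Int) × String × Int × Int :=
  let (files, cf, a, d) := st
  if pvHdr line then
    (if cf ≠ "" then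
        files ++ [(cf, (if a > 0 ∨ d > 0 then "modified" else "changed"), a, d, a + d)]
      else files,
     PySem.Str.slice line (some 6) none, 0, 0)
  else if pvPlus line then (files, cf, a + 1, d)
  else if pvMinus line then (files, cf, a, d + 1)
  else (files, cf, a, d)

def parse_diff_for_files (diff : String) : List (String × String × Int × Int × Int) :=
  let st := ((PySem.Str.split? diff "\n").getD []).foldl pvStepA ([], "", 0, 0)
  let (files, cf, a, d) := st
  if cf ≠ "" then
    files ++ [(cf, (if a > 0 ∨ d > 0 then "modified" else "changed"), a, d, a + d)]
  else files

-- ===== PORT B =====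
-- segment the (preamble-stripped) lines into (path, body) blocks, then reduce each block
def pvSegments : List String → List (String × List String)
  | [] => []
  | l :: rest =>
    (PySem.Str.slice l (some 6) none, rest.takeWhile (fun x => !pvHdr x)) ::
      pvSegments (rest.dropWhile (fun x => !pvHdr x))
termination_by ls => ls.length
decreasing_by simpa using Nat.lt_succ_of_le (List.length_dropWhile_le _ _)

def pvReview (path : String) (body : List String) : String × String × Int × Int × Int :=
  let adds : Int := (body.countP pvPlus : Nat)
  let dels : Int := (body.countP pvMinus : Nat)
  (path, (if adds + dels > 0 then "modified" else "changed"), adds, dels, adds + dels)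

def parse_diff_for_files_alt (diff : String) : List (String × String × Int × Int × Int) :=
  let lines := ((PySem.Str.split? diff "\n").getD []).dropWhile (fun l => !pvHdr l)
  ((pvSegments lines).filter (fun pb => pb.1 != "")).map (fun pb => pvReview pb.1 pb.2)

-- ===== PRECONDITION & SPEC =====
def Spec_parse_diff_for_files (diff : String) (out : List (String × String × Int × Int × Int)) : Prop := out = parse_diff_for_files_alt diff
instance (diff : String) (out : List (String × String × Int × Int × Int)) : Decidable (Spec_parse_diff_for_files diff out) := by unfold Spec_parse_diff_for_files; infer_instance

-- ===== CLAIM (what is proved, stated in full; the proofs are below) =====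
def Claim_equal_parse_diff_for_files : Prop := ∀ (diff : String), Dom_parse_diff_for_files diff → Spec_parse_diff_for_files diff (parse_diff_for_files diff)

-- ===== LEMMAS AND PROOFS =====

-- A's final flush, as a list
def pvFlush (cf : String) (a d : Int) : List (String × String × Int × Int × Int) :=
  if cf ≠ "" then [(cf, (if a > 0 ∨ d > 0 then "modified" else "changed"), a, d, a + d)] else []

-- B's reduce step, as a function of the remaining (header-led) lines
def pvOut (ls : List String) : List (String × String × Int × Int × Int) :=
  ((pvSegments ls).filter (fun pb => pb.1 != "")).map (fun pb => pvReview pb.1 pb.2)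

lemma pvPlus_minus (l : String) (h : pvPlus l = true) : pvMinus l = false := by
  have h1 : PySem.Chars.startswith l.toList ['+'] = true := by
    unfold pvPlus at h
    simp only [Bool.and_eq_true] at h
    simpa [PySem.Str.startswith] using h.1
  have h2 : PySem.Chars.startswith l.toList ['-'] = false := by
    unfold PySem.Chars.startswith at h1 ⊢
    cases hl : l.toList with
    | nil => rw [hl] at h1; simp [List.isPrefixOf] at h1
    | cons c cs =>
      rw [hl] at h1
      simp [List.isPrefixOf] at h1 ⊢
      subst h1
      decide
  unfold pvMinus
  have h3 : PySem.Str.startswith l "-" = false := by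
    rw [PySem.Str.startswith_eq]
    simpa using h2
  rw [h3]
  rfl

lemma pvFlush_counts (path : String) (body : List String) :
    pvFlush path ((body.countP pvPlus : Nat) : Int) ((body.countP pvMinus : Nat) : Int)
      = if path != "" then [pvReview path body] else [] := by
  have hst : ∀ p m : Nat, (if ((p:Int) > 0 ∨ (m:Int) > 0) then "modified" else "changed")
      = (if ((p:Int) + (m:Int) > 0) then "modified" else "changed") := by
    intro p m
    by_cases hco : ((p:Int) + (m:Int) > 0)
    · rw [if_pos hco, if_pos (by omega)]
    · rw [if_neg hco, if_neg (by omega)]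
  unfold pvFlush pvReview
  by_cases hp : path = ""
  · simp [hp]
  · simp only [hp, ne_eq, not_false_iff, bne_iff_ne, if_pos]
    rw [hst]

lemma pvOut_cons (l : String) (rest : List String) :
    pvOut (l :: rest)
      = (if PySem.Str.slice l (some 6) none != "" then
           [pvReview (PySem.Str.slice l (some 6) none) (rest.takeWhile (fun x => !pvHdr x))]
         else [])
        ++ pvOut (rest.dropWhile (fun x => !pvHdr x)) := by
  rw [pvOut, pvSegments]
  by_cases h : PySem.Str.slice l (some 6) none = "" <;>
    simp [pvOut, h]

lemma pvMain (lines : List String) : ∀ (files : List (String × String × Int × Int × Int))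
    (cf : String) (a d : Int),
    (let st := lines.foldl pvStepA (files, cf, a, d)
     if st.2.1 ≠ "" then
       st.1 ++ [(st.2.1, (if st.2.2.1 > 0 ∨ st.2.2.2 > 0 then "modified" else "changed"),
                 st.2.2.1, st.2.2.2, st.2.2.1 + st.2.2.2)]
     else st.1)
    = files ++ pvFlush cf (a + ((lines.takeWhile (fun x => !pvHdr x)).countP pvPlus : Nat))
                          (d + ((lines.takeWhile (fun x => !pvHdr x)).countP pvMinus : Nat))
        ++ pvOut (lines.dropWhile (fun x => !pvHdr x)) := by
  induction lines with
  | nil =>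
    intro files cf a d
    by_cases hc : cf = "" <;> simp [pvFlush, pvOut, pvSegments, hc]
  | cons l rest ih =>
    intro files cf a d
    rw [List.foldl_cons, List.takeWhile_cons, List.dropWhile_cons]
    by_cases hh : pvHdr l
    · have hstep : pvStepA (files, cf, a, d) l
          = ((if cf ≠ "" then
                files ++ [(cf, (if a > 0 ∨ d > 0 then "modified" else "changed"), a, d, a + d)]
              else files),
             PySem.Str.slice l (some 6) none, 0, 0) := by
        simp [pvStepA, hh]
      rw [hstep, ih]
      simp only [zero_add]
      rw [pvFlush_counts]
      simp only [hh, Bool.not_true, Bool.false_eq_true, if_false, List.countP_nil,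
        Nat.cast_zero, add_zero]
      rw [pvOut_cons]
      by_cases hc : cf = "" <;> simp [pvFlush, hc]
    · have hbh : (!pvHdr l) = true := by simp [hh]
      simp only [hbh, if_true]
      by_cases hp : pvPlus l
      · have hm := pvPlus_minus l hp
        have hstep : pvStepA (files, cf, a, d) l = (files, cf, a + 1, d) := by
          simp [pvStepA, hh, hp]
        rw [hstep, ih, List.countP_cons, List.countP_cons]
        simp only [hp, hm, Bool.false_eq_true, if_true, if_false, add_zero]
        rw [show a + 1 + (((rest.takeWhile (fun x => !pvHdr x)).countP pvPlus : Nat) : Int)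
              = a + (((rest.takeWhile (fun x => !pvHdr x)).countP pvPlus + 1 : Nat) : Int) by
            push_cast; ring]
      · by_cases hmn : pvMinus l
        · have hstep : pvStepA (files, cf, a, d) l = (files, cf, a, d + 1) := by
            simp [pvStepA, hh, hp, hmn]
          rw [hstep, ih, List.countP_cons, List.countP_cons]
          simp only [hp, hmn, Bool.false_eq_true, if_true, if_false, add_zero]
          rw [show d + 1 + (((rest.takeWhile (fun x => !pvHdr x)).countP pvMinus : Nat) : Int)
                = d + (((rest.takeWhile (fun x => !pvHdr x)).countP pvMinus + 1 : Nat) : Int) by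
              push_cast; ring]
        · have hstep : pvStepA (files, cf, a, d) l = (files, cf, a, d) := by
            simp [pvStepA, hh, hp, hmn]
          rw [hstep, ih, List.countP_cons, List.countP_cons]
          simp only [hp, hmn, Bool.false_eq_true, if_false, add_zero]

-- ===== VERDICT (by name: the statement is the Claim_ definition above) =====
theorem parse_diff_for_files_spec : Claim_equal_parse_diff_for_files := by
  intro diff _
  unfold Spec_parse_diff_for_files parse_diff_for_files parse_diff_for_files_alt
  have h := pvMain ((PySem.Str.split? diff "\n").getD []) [] "" 0 0
  rcases hst : ((PySem.Str.split? diff "\n").getD []).foldl pvStepA ([], "", 0, 0)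
    with ⟨files, cf, a, d⟩
  rw [hst] at h
  simp only at h
  simp only [pvFlush, pvOut] at h ⊢
  simpa using h
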